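-- pv_equiv track=rewrite | github.com/Akashdeepsingh1/project | LeetcodeRandom/longestnonpalindromic.py | longestnonpalindromicsubsequence
-- ===== SOURCE A (Python) =====
-- def longestnonpalindromicsubsequence(s):
--     l = len(s)
--     if l == 0:
--         return 0
--     elif l == 1:
--         return 0
--     else:
--         temp_list = [[0 for i in range(l)]for j in range(l)]
--         k = 2
--         while k <= l:
--             for i in range(l-k+1):
--                 j = i + k-1
--                 if k ==2:
--                     if s[i] != s[j]:
--                         temp_list[i][j] = 1
--                 elif s[i]!=s[j]:
--                     temp_list[i][j] = max(temp_list[i+1][j], temp_list[i][j-1])+2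
--                 else:
--                     temp_list[i][j] = max(temp_list[i+1][j], temp_list[i][j-1])
--             k+=1
--
--
--         return temp_list
-- ===== SOURCE B (Python) =====
-- def longestnonpalindromicsubsequence(s):
--     l = len(s)
--     if l == 0:
--         return 0
--     elif l == 1:
--         return 0
--     memo = {}
--
--     def solve(i, j):
--         # demand-driven memoized evaluation with an explicit work stack
--         stack = [(i, j)]
--         while stack:
--             a, b = stack[-1]
--             if (a, b) in memo:
--                 stack.pop()
--             elif b <= a:
--                 memo[(a, b)] = 0
--                 stack.pop()
--             elif (a + 1, b) not in memo:
--                 stack.append((a + 1, b))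
--             elif (a, b - 1) not in memo:
--                 stack.append((a, b - 1))
--             else:
--                 best = max(memo[(a + 1, b)], memo[(a, b - 1)])
--                 if s[a] != s[b]:
--                     best += 1 if b == a + 1 else 2
--                 memo[(a, b)] = best
--                 stack.pop()
--         return memo[(i, j)]
--
--     table = [[0] * l for _ in range(l)]
--     for i in range(l):
--         for j in range(i + 1, l):
--             table[i][j] = solve(i, j)
--     return table
-- ===== Notes on version B (the rewrite author's own statement) =====
-- stated objective: alternative
-- what changed: Replaces A's bottom-up table sweep over subsequence lengths by demand-driven memoized evaluation: each cell is resolved by an explicit work stack that pushes missing dependencies and caches results in a dictionary, with the table populated from the cache row by row.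
-- outside the precondition, e.g. on longestnonpalindromicsubsequence(''): A returns 0, B returns 0; on longestnonpalindromicsubsequence('a'): A returns 0, B returns 0
import Mathlib
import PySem

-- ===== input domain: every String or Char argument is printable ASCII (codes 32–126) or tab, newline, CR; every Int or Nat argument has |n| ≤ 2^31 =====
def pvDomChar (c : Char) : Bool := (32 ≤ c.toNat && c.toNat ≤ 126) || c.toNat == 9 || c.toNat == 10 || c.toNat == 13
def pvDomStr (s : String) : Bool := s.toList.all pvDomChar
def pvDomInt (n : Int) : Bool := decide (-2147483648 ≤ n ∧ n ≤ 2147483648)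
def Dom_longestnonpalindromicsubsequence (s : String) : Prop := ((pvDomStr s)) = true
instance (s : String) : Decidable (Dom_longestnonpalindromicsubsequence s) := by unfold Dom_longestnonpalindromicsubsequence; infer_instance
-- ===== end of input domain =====

-- B replaces A's bottom-up sweep over subsequence lengths by demand-driven memoized evaluation:
-- an explicit work stack resolves each cell, pushing missing dependencies and caching results in a
-- dictionary, and the table is filled from the cache row by row; objective: alternative, same cost.

-- shared table helpers: read / write one cell of the l×l list-of-lists table (in-range Python indexing)
def tget (t : List (List Int)) (i j : Nat) : Int := (t.getD i []).getD j 0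

def tset (t : List (List Int)) (i j : Nat) (v : Int) : List (List Int) :=
  t.set i ((t.getD i []).set j v)

-- loop body of A's inner for-loop (one cell of the length-k diagonal)
def stepA (cs : List Char) (k : Nat) (t : List (List Int)) (i : Nat) : List (List Int) :=
  let j := i + k - 1
  if k = 2 then
    if cs.getD i ' ' ≠ cs.getD j ' ' then tset t i j 1 else t
  else if cs.getD i ' ' ≠ cs.getD j ' ' then
    tset t i j (max (tget t (i + 1) j) (tget t i (j - 1)) + 2)
  else
    tset t i j (max (tget t (i + 1) j) (tget t i (j - 1)))

-- ===== PORT A =====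
def longestnonpalindromicsubsequence (s : String) : List (List Int) :=
  let cs := s.toList
  let l := cs.length
  if l ≤ 1 then []   -- Python A returns the int 0 here (not a table); outside Pre_
  else
    let init := (List.range l).map (fun _ => (List.range l).map (fun _ => (0 : Int)))
    (List.range' 2 (l - 1)).foldl (fun t k =>
      (List.range (l - k + 1)).foldl (stepA cs k) t) init

-- ===== PORT B =====
-- B's inner while-loop over the explicit work stack (head of the list = top of the stack;
-- stack.append pushes at the head).  Python's loop needs no fuel; the Nat fuel argument here is
-- only a structural-termination guard, and the caller passes enough for the loop to finish.
def solveLoop (cs : List Char) : Nat → List (Nat × Nat) → PySem.Dict (Nat × Nat) Int → PySem.Dict (Nat × Nat) Int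
  | 0, _, m => m
  | _ + 1, [], m => m
  | fuel + 1, (a, b) :: rest, m =>
    if m.contains (a, b) = true then solveLoop cs fuel rest m
    else if b ≤ a then solveLoop cs fuel rest (m.insert (a, b) 0)
    else if m.contains (a + 1, b) = false then solveLoop cs fuel ((a + 1, b) :: (a, b) :: rest) m
    else if m.contains (a, b - 1) = false then solveLoop cs fuel ((a, b - 1) :: (a, b) :: rest) m
    else
      solveLoop cs fuel rest (m.insert (a, b)
        (max (m.getD (a + 1, b) 0) (m.getD (a, b - 1) 0) +
          (if cs.getD a ' ' ≠ cs.getD b ' ' then (if b = a + 1 then (1 : Int) else 2) else 0)))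

-- Python's solve(i, j): run the stack loop, then read memo[(i, j)] (proved present below, so the
-- getD default is never used); fuel 2^(l+3) is enough for the loop to terminate on its own.
def solve (cs : List Char) (l i j : Nat) (m : PySem.Dict (Nat × Nat) Int) :
    Int × PySem.Dict (Nat × Nat) Int :=
  let m' := solveLoop cs (2 ^ (l + 3)) [(i, j)] m
  (m'.getD (i, j) 0, m')

-- one row of B's driving double loop: for j in range(i+1, l): table[i][j] = solve(i, j)
def rowB (cs : List Char) (l : Nat) (st : List (List Int) × PySem.Dict (Nat × Nat) Int) (i : Nat) :
    List (List Int) × PySem.Dict (Nat × Nat) Int :=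
  (List.range' (i + 1) (l - (i + 1))).foldl (fun st j =>
    let r := solve cs l i j st.2
    (tset st.1 i j r.1, r.2)) st

def longestnonpalindromicsubsequence_alt (s : String) : List (List Int) :=
  let cs := s.toList
  let l := cs.length
  if l ≤ 1 then []   -- Python B returns the int 0 here (not a table); outside Pre_
  else
    let init := (List.range l).map (fun _ => (List.range l).map (fun _ => (0 : Int)))
    ((List.range l).foldl (rowB cs l) (init, PySem.Dict.empty)).1

-- ===== PRECONDITION & SPEC =====
-- Pre_ excludes strings of length ≤ 1, on which Python A returns the int 0 instead of a table
-- (a value outside the declared return type List (List Int)).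
def Pre_longestnonpalindromicsubsequence (s : String) : Prop := 2 ≤ s.toList.length

instance (s : String) : Decidable (Pre_longestnonpalindromicsubsequence s) := by
  unfold Pre_longestnonpalindromicsubsequence; infer_instance

def pvWitness_longestnonpalindromicsubsequence : String := "ab"

def Spec_longestnonpalindromicsubsequence (s : String) (out : List (List Int)) : Prop :=
  out = longestnonpalindromicsubsequence_alt s

instance (s : String) (out : List (List Int)) : Decidable (Spec_longestnonpalindromicsubsequence s out) := by
  unfold Spec_longestnonpalindromicsubsequence; infer_instance

-- ===== CLAIM (what is proved, stated in full; the proofs are below) =====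
def Claim_equal_longestnonpalindromicsubsequence : Prop :=
  ∀ (s : String), Dom_longestnonpalindromicsubsequence s →
    Pre_longestnonpalindromicsubsequence s →
    Spec_longestnonpalindromicsubsequence s (longestnonpalindromicsubsequence s)

-- ===== LEMMAS AND PROOFS =====

-- the common DP value: both versions compute fval cs i j at every cell above the diagonal
def fval (cs : List Char) (i j : Nat) : Int :=
  if j ≤ i then 0
  else
    max (fval cs (i + 1) j) (fval cs i (j - 1)) +
      (if cs.getD i ' ' ≠ cs.getD j ' ' then (if j = i + 1 then 1 else 2) else 0)
termination_by j - i
decreasing_by all_goals omega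

lemma fval_le (cs : List Char) (i j : Nat) (h : j ≤ i) : fval cs i j = 0 := by
  rw [fval]; simp [h]

lemma fval_gt (cs : List Char) {i j : Nat} (h : i < j) :
    fval cs i j = max (fval cs (i + 1) j) (fval cs i (j - 1)) +
      (if cs.getD i ' ' ≠ cs.getD j ' ' then (if j = i + 1 then 1 else 2) else 0) := by
  rw [fval]; simp [Nat.not_le.mpr h]

-- "Fill P t": t is an l×l table whose cell (i,j) holds fval if P i j, else 0
def Fill (cs : List Char) (l : Nat) (P : Nat → Nat → Bool) (t : List (List Int)) : Prop :=
  t.length = l ∧ (∀ r ∈ t, r.length = l) ∧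
    ∀ i j, i < l → j < l → tget t i j = if P i j then fval cs i j else 0

lemma Fill_congr {cs : List Char} {l : Nat} {P Q : Nat → Nat → Bool} {t : List (List Int)} (h : Fill cs l P t)
    (hpq : ∀ i j, i < l → j < l →
      (if P i j then fval cs i j else 0) = (if Q i j then fval cs i j else 0)) :
    Fill cs l Q t := by
  obtain ⟨h1, h2, h3⟩ := h
  exact ⟨h1, h2, fun i j hi hj => (h3 i j hi hj).trans (hpq i j hi hj)⟩

lemma tset_length (t : List (List Int)) (i j : Nat) (v : Int) :
    (tset t i j v).length = t.length := by simp [tset]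

lemma getD_set (xs : List Int) (d : Int) (i j : Nat) (v : Int) :
    (xs.set i v).getD j d = if j = i ∧ i < xs.length then v else xs.getD j d := by
  simp [List.getD, List.getElem?_set]
  split_ifs <;> simp_all

lemma getD_set' (xs : List (List Int)) (d : List Int) (i j : Nat) (v : List Int) :
    (xs.set i v).getD j d = if j = i ∧ i < xs.length then v else xs.getD j d := by
  simp [List.getD, List.getElem?_set]
  split_ifs <;> simp_all

lemma tset_rows {t : List (List Int)} {l : Nat} (ht : t.length = l)
    (hr : ∀ r ∈ t, r.length = l) {i : Nat} (hi : i < l) (j : Nat) (v : Int) :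
    ∀ r ∈ tset t i j v, r.length = l := by
  intro r hr'
  rcases List.mem_or_eq_of_mem_set hr' with h | h
  · exact hr r h
  · subst h
    have hi' : i < t.length := by omega
    simp [List.getD, List.getElem?_eq_getElem hi']
    exact hr _ (List.getElem_mem hi')

lemma tget_tset {t : List (List Int)} {l : Nat} (ht : t.length = l)
    (hr : ∀ r ∈ t, r.length = l) {i j : Nat} (hi : i < l) (hj : j < l)
    (v : Int) (i' j' : Nat) :
    tget (tset t i j v) i' j' = if i' = i ∧ j' = j then v else tget t i' j' := by
  have hi' : i < t.length := by omega
  have hrow : (t.getD i []).length = l := by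
    have := hr _ (List.getElem_mem hi')
    simpa [List.getD, List.getElem?_eq_getElem hi'] using this
  unfold tget tset
  rw [getD_set']
  by_cases hii : i' = i
  · subst hii
    rw [if_pos ⟨rfl, hi'⟩, getD_set]
    by_cases hjj : j' = j
    · rw [if_pos ⟨hjj, by omega⟩, if_pos ⟨rfl, hjj⟩]
    · rw [if_neg (by tauto), if_neg (by tauto)]
  · rw [if_neg (by tauto), if_neg (by tauto)]

lemma Fill_init (cs : List Char) (l : Nat) :
    Fill cs l (fun i j => decide (j + 1 < i + 2))
      ((List.range l).map (fun _ => (List.range l).map (fun _ => (0 : Int)))) := by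
  refine ⟨by simp, by simp, ?_⟩
  intro i j hi hj
  have : tget ((List.range l).map (fun _ => (List.range l).map (fun _ => (0 : Int)))) i j = 0 := by
    simp [tget, List.getD, hi, hj]
  rw [this]
  by_cases h : j + 1 < i + 2
  · simp [h, fval_le cs i j (by omega)]
  · simp [h]

-- writing the correct value into one cell extends the filled region by that cell
lemma Fill_write {cs : List Char} {l : Nat} {P : Nat → Nat → Bool} {t : List (List Int)}
    (h : Fill cs l P t) {i j : Nat} (hi : i < l) (hj : j < l) {w : Int}
    (hw : w = fval cs i j) :
    Fill cs l (fun i' j' => P i' j' || (decide (i' = i) && decide (j' = j))) (tset t i j w) := by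
  obtain ⟨ht, hr, hc⟩ := h
  refine ⟨by rw [tset_length]; exact ht, tset_rows ht hr hi _ _, ?_⟩
  intro i' j' hi' hj'
  rw [tget_tset ht hr hi hj]
  by_cases hij : i' = i ∧ j' = j
  · rw [if_pos hij]
    simp [hij.1, hij.2, hw]
  · rw [if_neg hij, hc i' j' hi' hj']
    have hb : (decide (i' = i) && decide (j' = j)) = false := by
      simp only [Bool.and_eq_false_iff, decide_eq_false_iff_not]; tauto
    simp [hb]

-- rewriting the test of a stored-value if by a propositional equivalence
lemma if_iff_val (b c : Bool) (h : b = true ↔ c = true) (x : Int) :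
    (if b = true then x else 0) = (if c = true then x else 0) := by
  by_cases hb : b = true
  · rw [if_pos hb, if_pos (h.mp hb)]
  · rw [if_neg hb, if_neg (fun hc => hb (h.mpr hc))]

-- ===== inner pass of A: fills the diagonal j = i + k - 1 =====
lemma innerA (cs : List Char) (l k : Nat) (hl : l = cs.length) (hk : 2 ≤ k) (hkl : k ≤ l) :
    ∀ n, n ≤ l - k + 1 → ∀ t, Fill cs l (fun i j => decide (j + 1 < i + k)) t →
      Fill cs l (fun i j => decide (j + 1 < i + k ∨ (i < n ∧ j + 1 = i + k)))
        ((List.range n).foldl (stepA cs k) t) := by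
  intro n
  induction n with
  | zero =>
    intro _ t h
    simp only [List.range_zero, List.foldl_nil]
    refine Fill_congr h ?_
    intro i j _ _
    apply if_iff_val
    simp only [decide_eq_true_eq]
    omega
  | succ n ih =>
    intro hn t h
    rw [List.range_succ, List.foldl_append, List.foldl_cons, List.foldl_nil]
    have h1 := ih (by omega) t h
    set t' := List.foldl (stepA cs k) t (List.range n) with ht'
    obtain ⟨ht, hr, hc⟩ := h1
    have hjl : n + k - 1 < l := by omega
    have hnl : n < l := by omega
    have hn1l : n + 1 < l := by omega
    have hj1l : n + k - 1 - 1 < l := by omega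
    have e1 : tget t' (n + 1) (n + k - 1) = fval cs (n + 1) (n + k - 1) := by
      rw [hc _ _ hn1l hjl, if_pos (by simp only [decide_eq_true_eq]; omega)]
    have e2 : tget t' n (n + k - 1 - 1) = fval cs n (n + k - 1 - 1) := by
      rw [hc _ _ hnl hj1l, if_pos (by simp only [decide_eq_true_eq]; omega)]
    have hstep : stepA cs k t' n =
        (if k = 2 then
          (if cs.getD n ' ' ≠ cs.getD (n + k - 1) ' ' then tset t' n (n + k - 1) 1 else t')
        else if cs.getD n ' ' ≠ cs.getD (n + k - 1) ' ' then
          tset t' n (n + k - 1) (max (tget t' (n + 1) (n + k - 1)) (tget t' n (n + k - 1 - 1)) + 2)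
        else
          tset t' n (n + k - 1) (max (tget t' (n + 1) (n + k - 1)) (tget t' n (n + k - 1 - 1)))) := rfl
    rw [hstep]
    by_cases hk2 : k = 2
    · subst hk2
      by_cases hch : cs.getD n ' ' ≠ cs.getD (n + 2 - 1) ' '
      · rw [if_pos rfl, if_pos hch]
        refine Fill_congr (Fill_write ⟨ht, hr, hc⟩ hnl hjl ?_) ?_
        · rw [fval_gt cs (show n < n + 2 - 1 by omega)]
          rw [fval_le cs (n + 1) (n + 2 - 1) (by omega), fval_le cs n (n + 2 - 1 - 1) (by omega)]
          rw [if_pos hch, if_pos (show n + 2 - 1 = n + 1 by omega)]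
          simp
        · intro i j _ _
          apply if_iff_val
          simp only [Bool.or_eq_true, Bool.and_eq_true, decide_eq_true_eq]
          omega
      · rw [if_pos rfl, if_neg hch]
        refine Fill_congr ⟨ht, hr, hc⟩ ?_
        intro i j _ _
        have hfz : fval cs n (n + 2 - 1) = 0 := by
          rw [fval_gt cs (show n < n + 2 - 1 by omega)]
          rw [fval_le cs (n + 1) (n + 2 - 1) (by omega), fval_le cs n (n + 2 - 1 - 1) (by omega)]
          simp only [show n + 2 - 1 = n + 1 from rfl]
          simp at hch
          simp [hch]
        by_cases hp : j + 1 < i + 2 ∨ (i < n ∧ j + 1 = i + 2)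
        · rw [if_pos (by simp only [decide_eq_true_eq]; exact hp),
              if_pos (by simp only [decide_eq_true_eq]; omega)]
        · by_cases hq : j + 1 < i + 2 ∨ (i < n + 1 ∧ j + 1 = i + 2)
          · rw [if_neg (by simp only [decide_eq_true_eq]; exact hp),
                if_pos (by simp only [decide_eq_true_eq]; exact hq)]
            have : i = n ∧ j = n + 2 - 1 := by omega
            rw [this.1, this.2, hfz]
          · rw [if_neg (by simp only [decide_eq_true_eq]; exact hp),
                if_neg (by simp only [decide_eq_true_eq]; exact hq)]
    · have hwv : ∀ w : Int, w = fval cs n (n + k - 1) →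
        Fill cs l (fun i j => decide (j + 1 < i + k ∨ (i < n + 1 ∧ j + 1 = i + k)))
          (tset t' n (n + k - 1) w) := by
        intro w hw
        refine Fill_congr (Fill_write ⟨ht, hr, hc⟩ hnl hjl hw) ?_
        intro i j _ _
        apply if_iff_val
        simp only [Bool.or_eq_true, Bool.and_eq_true, decide_eq_true_eq]
        omega
      by_cases hch : cs.getD n ' ' ≠ cs.getD (n + k - 1) ' '
      · rw [if_neg hk2, if_pos hch, e1, e2]
        refine hwv _ ?_
        rw [fval_gt cs (show n < n + k - 1 by omega)]
        rw [if_pos hch, if_neg (by omega)]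
      · rw [if_neg hk2, if_neg hch, e1, e2]
        refine hwv _ ?_
        rw [fval_gt cs (show n < n + k - 1 by omega)]
        rw [if_neg hch]
        simp

-- ===== outer loop of A =====
lemma outerA (cs : List Char) (l : Nat) (hl : l = cs.length) :
    ∀ m k t, 2 ≤ k → k + m = l + 1 → Fill cs l (fun i j => decide (j + 1 < i + k)) t →
      Fill cs l (fun i j => decide (j + 1 < i + (k + m)))
        ((List.range' k m).foldl (fun t k =>
          (List.range (l - k + 1)).foldl (stepA cs k) t) t) := by
  intro m
  induction m with
  | zero =>
    intro k t _ hkm h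
    simp only [List.range'_zero, List.foldl_nil]
    exact h
  | succ m ih =>
    intro k t hk hkm h
    rw [List.range'_succ, List.foldl_cons]
    have hkl : k ≤ l := by omega
    have h1 := innerA cs l k hl hk hkl (l - k + 1) (le_refl _) t h
    have h2 : Fill cs l (fun i j => decide (j + 1 < i + (k + 1)))
        ((List.range (l - k + 1)).foldl (stepA cs k) t) := by
      refine Fill_congr h1 ?_
      intro i j _ hj
      apply if_iff_val
      simp only [decide_eq_true_eq]
      omega
    have h3 := ih (k + 1) _ (by omega) (by omega) h2
    refine Fill_congr h3 ?_
    intro i j _ _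
    apply if_iff_val
    simp only [decide_eq_true_eq]
    omega

-- ===== B side: correctness of the stack-driven memoized evaluation =====

-- every value cached in the memo dictionary is the DP value of its key
def Correct (cs : List Char) (m : PySem.Dict (Nat × Nat) Int) : Prop :=
  ∀ a b v, m.get? (a, b) = some v → v = fval cs a b

lemma solveLoop_nil (cs : List Char) (fuel : Nat) (m : PySem.Dict (Nat × Nat) Int) :
    solveLoop cs fuel [] m = m := by
  cases fuel <;> rfl

-- one unfolding of the loop on a non-empty stack
lemma solveLoop_cons (cs : List Char) (fuel a b : Nat) (rest : List (Nat × Nat))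
    (m : PySem.Dict (Nat × Nat) Int) :
    solveLoop cs (fuel + 1) ((a, b) :: rest) m =
      (if m.contains (a, b) = true then solveLoop cs fuel rest m
      else if b ≤ a then solveLoop cs fuel rest (m.insert (a, b) 0)
      else if m.contains (a + 1, b) = false then solveLoop cs fuel ((a + 1, b) :: (a, b) :: rest) m
      else if m.contains (a, b - 1) = false then solveLoop cs fuel ((a, b - 1) :: (a, b) :: rest) m
      else
        solveLoop cs fuel rest (m.insert (a, b)
          (max (m.getD (a + 1, b) 0) (m.getD (a, b - 1) 0) +
            (if cs.getD a ' ' ≠ cs.getD b ' ' then (if b = a + 1 then (1 : Int) else 2) else 0)))) :=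
  rfl

lemma Correct_insert {cs : List Char} {m : PySem.Dict (Nat × Nat) Int} (h : Correct cs m)
    {a b : Nat} {v : Int} (hv : v = fval cs a b) : Correct cs (m.insert (a, b) v) := by
  intro a' b' w hw
  rw [PySem.Dict.get?_insert] at hw
  by_cases he : ((a', b') : Nat × Nat) = (a, b)
  · rw [if_pos he] at hw
    rw [Prod.mk.injEq] at he
    cases hw
    rw [he.1, he.2]
    exact hv
  · rw [if_neg he] at hw
    exact h a' b' w hw

lemma get?_mono_insert {m : PySem.Dict (Nat × Nat) Int} {a b : Nat} (v : Int)
    (hn : m.contains (a, b) = false) :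
    ∀ k w, m.get? k = some w → (m.insert (a, b) v).get? k = some w := by
  intro k w hw
  rw [PySem.Dict.get?_insert]
  by_cases he : k = (a, b)
  · subst he
    rw [PySem.Dict.contains_eq_isSome_get?, hw] at hn
    simp at hn
  · rw [if_neg he]; exact hw

lemma contains_of_get? {m : PySem.Dict (Nat × Nat) Int} {k : Nat × Nat} {v : Int}
    (h : m.get? k = some v) : m.contains k = true := by
  rw [PySem.Dict.contains_eq_isSome_get?, h]; rfl

lemma get?_of_contains_correct {cs : List Char} {m : PySem.Dict (Nat × Nat) Int}
    (hC : Correct cs m) {a b : Nat} (h : m.contains (a, b) = true) :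
    m.get? (a, b) = some (fval cs a b) := by
  rw [PySem.Dict.contains_eq_isSome_get?] at h
  cases hv : m.get? (a, b) with
  | none => rw [hv] at h; simp at h
  | some v => exact congrArg some (hC a b v hv)

-- resolving the top of the stack when both dependencies are cached (or the cell itself is): one step
lemma finish_top (cs : List Char) (a b : Nat) (m : PySem.Dict (Nat × Nat) Int)
    (hab : a < b) (hC : Correct cs m)
    (hd1 : m.get? (a + 1, b) = some (fval cs (a + 1) b))
    (hd2 : m.get? (a, b - 1) = some (fval cs a (b - 1))) :
    ∃ m', Correct cs m' ∧ m'.get? (a, b) = some (fval cs a b) ∧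
      (∀ k v, m.get? k = some v → m'.get? k = some v) ∧
      ∀ fuel rest, solveLoop cs (1 + fuel) ((a, b) :: rest) m = solveLoop cs fuel rest m' := by
  by_cases hc : m.contains (a, b) = true
  · refine ⟨m, hC, get?_of_contains_correct hC hc, fun _ _ h => h, ?_⟩
    intro fuel rest
    rw [Nat.add_comm 1 fuel, solveLoop_cons, if_pos hc]
  · have hcf : m.contains (a, b) = false := Bool.eq_false_iff.mpr hc
    have hbest : max (m.getD (a + 1, b) 0) (m.getD (a, b - 1) 0) +
        (if cs.getD a ' ' ≠ cs.getD b ' ' then (if b = a + 1 then (1 : Int) else 2) else 0) =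
        fval cs a b := by
      rw [PySem.Dict.getD_of_get?_eq_some _ _ hd1, PySem.Dict.getD_of_get?_eq_some _ _ hd2,
        fval_gt cs hab]
    refine ⟨m.insert (a, b) (max (m.getD (a + 1, b) 0) (m.getD (a, b - 1) 0) +
        (if cs.getD a ' ' ≠ cs.getD b ' ' then (if b = a + 1 then (1 : Int) else 2) else 0)),
      Correct_insert hC hbest, ?_, get?_mono_insert _ hcf, ?_⟩
    · rw [PySem.Dict.get?_insert, if_pos rfl, hbest]
    · intro fuel rest
      rw [Nat.add_comm 1 fuel, solveLoop_cons, if_neg hc, if_neg (by omega),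
        if_neg (by rw [contains_of_get? hd1]; simp),
        if_neg (by rw [contains_of_get? hd2]; simp)]

-- the loop invariant: resolving one stack entry of gap ≤ g needs at most 2^(g+3) - 3 steps,
-- preserves and extends the memo, and caches the entry's DP value
lemma run_top (cs : List Char) :
    ∀ g a b m, b ≤ a + g → Correct cs m →
      ∃ m' used, used ≤ 2 ^ (g + 3) - 3 ∧ Correct cs m' ∧
        m'.get? (a, b) = some (fval cs a b) ∧
        (∀ k v, m.get? k = some v → m'.get? k = some v) ∧
        ∀ fuel rest, solveLoop cs (used + fuel) ((a, b) :: rest) m = solveLoop cs fuel rest m' := by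
  intro g
  induction g with
  | zero =>
    intro a b m hg hC
    by_cases hc : m.contains (a, b) = true
    · refine ⟨m, 1, by norm_num, hC, get?_of_contains_correct hC hc, fun _ _ h => h, ?_⟩
      intro fuel rest
      rw [Nat.add_comm 1 fuel, solveLoop_cons, if_pos hc]
    · have hcf : m.contains (a, b) = false := Bool.eq_false_iff.mpr hc
      have hba : b ≤ a := by omega
      refine ⟨m.insert (a, b) 0, 1, by norm_num,
        Correct_insert hC (fval_le cs a b hba).symm, ?_, get?_mono_insert _ hcf, ?_⟩
      · rw [PySem.Dict.get?_insert, if_pos rfl, fval_le cs a b hba]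
      · intro fuel rest
        rw [Nat.add_comm 1 fuel, solveLoop_cons, if_neg hc, if_pos hba]
  | succ g ih =>
    intro a b m hg hC
    have hdbl : (2:Nat) ^ (g + 1 + 3) = 2 * 2 ^ (g + 3) := by
      rw [show g + 1 + 3 = (g + 3) + 1 by omega, pow_succ]; ring
    have hFg : (8:Nat) ≤ 2 ^ (g + 3) := by
      calc (8:Nat) = 2 ^ 3 := by norm_num
        _ ≤ 2 ^ (g + 3) := Nat.pow_le_pow_right (by norm_num) (by omega)
    by_cases hab : b ≤ a
    · obtain ⟨m', used, hu, h1, h2, h3, h4⟩ := ih a b m (by omega) hC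
      exact ⟨m', used, by omega, h1, h2, h3, h4⟩
    · have hab' : a < b := by omega
      by_cases hc : m.contains (a, b) = true
      · refine ⟨m, 1, by omega, hC, get?_of_contains_correct hC hc, fun _ _ h => h, ?_⟩
        intro fuel rest
        rw [Nat.add_comm 1 fuel, solveLoop_cons, if_pos hc]
      · have hcf : m.contains (a, b) = false := Bool.eq_false_iff.mpr hc
        -- step 1: ensure (a+1, b) is cached, reaching memo m1 after used1 steps
        have step1 : ∃ m1 used1, used1 ≤ 2 ^ (g + 3) - 3 + 1 ∧ Correct cs m1 ∧
            m1.get? (a + 1, b) = some (fval cs (a + 1) b) ∧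
            (∀ k v, m.get? k = some v → m1.get? k = some v) ∧
            ∀ fuel rest, solveLoop cs (used1 + fuel) ((a, b) :: rest) m =
              solveLoop cs fuel ((a, b) :: rest) m1 := by
          by_cases hd1 : m.contains (a + 1, b) = true
          · exact ⟨m, 0, by omega, hC, get?_of_contains_correct hC hd1, fun _ _ h => h,
              fun fuel rest => by rw [Nat.zero_add]⟩
          · have hd1f : m.contains (a + 1, b) = false := Bool.eq_false_iff.mpr hd1
            obtain ⟨m1, used1, hu1, hC1, hget1, hmono1, heq1⟩ := ih (a + 1) b m (by omega) hC
            refine ⟨m1, 1 + used1, by omega, hC1, hget1, hmono1, ?_⟩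
            intro fuel rest
            have hrw : 1 + used1 + fuel = (used1 + fuel) + 1 := by omega
            rw [hrw, solveLoop_cons, if_neg hc, if_neg hab, if_pos hd1f, heq1]
        obtain ⟨m1, used1, hu1, hC1, hget1, hmono1, heq1⟩ := step1
        by_cases hc1 : m1.contains (a, b) = true
        · -- (a, b) itself got cached while resolving the dependency: one more step pops it
          refine ⟨m1, used1 + 1, by omega, hC1, get?_of_contains_correct hC1 hc1, hmono1, ?_⟩
          intro fuel rest
          have hrw : used1 + 1 + fuel = used1 + (1 + fuel) := by omega
          rw [hrw, heq1, Nat.add_comm 1 fuel, solveLoop_cons, if_pos hc1]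
        · have hc1f : m1.contains (a, b) = false := Bool.eq_false_iff.mpr hc1
          -- step 2: ensure (a, b-1) is cached, reaching memo m2 after used2 more steps
          have step2 : ∃ m2 used2, used2 ≤ 2 ^ (g + 3) - 3 + 1 ∧ Correct cs m2 ∧
              m2.get? (a + 1, b) = some (fval cs (a + 1) b) ∧
              m2.get? (a, b - 1) = some (fval cs a (b - 1)) ∧
              (∀ k v, m1.get? k = some v → m2.get? k = some v) ∧
              ∀ fuel rest, solveLoop cs (used2 + fuel) ((a, b) :: rest) m1 =
                solveLoop cs fuel ((a, b) :: rest) m2 := by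
            by_cases hd2 : m1.contains (a, b - 1) = true
            · exact ⟨m1, 0, by omega, hC1, hget1, get?_of_contains_correct hC1 hd2,
                fun _ _ h => h, fun fuel rest => by rw [Nat.zero_add]⟩
            · have hd2f : m1.contains (a, b - 1) = false := Bool.eq_false_iff.mpr hd2
              obtain ⟨m2, used2, hu2, hC2, hget2, hmono2, heq2⟩ := ih a (b - 1) m1 (by omega) hC1
              refine ⟨m2, 1 + used2, by omega, hC2, hmono2 _ _ hget1, hget2, hmono2, ?_⟩
              intro fuel rest
              have hrw : 1 + used2 + fuel = (used2 + fuel) + 1 := by omega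
              rw [hrw, solveLoop_cons, if_neg hc1, if_neg hab,
                if_neg (by rw [contains_of_get? hget1]; simp), if_pos hd2f, heq2]
          obtain ⟨m2, used2, hu2, hC2, hget21, hget22, hmono2, heq2⟩ := step2
          obtain ⟨m', hC', hget', hmono', heq'⟩ := finish_top cs a b m2 hab' hC2 hget21 hget22
          refine ⟨m', used1 + used2 + 1, by omega, hC', hget',
            fun k v h => hmono' k v (hmono2 k v (hmono1 k v h)), ?_⟩
          intro fuel rest
          have hrw : used1 + used2 + 1 + fuel = used1 + (used2 + (1 + fuel)) := by omega
          rw [hrw, heq1, heq2, heq']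

-- solve really returns the DP value of (i, j) and a still-correct memo
lemma solve_correct (cs : List Char) (l i j : Nat) (m : PySem.Dict (Nat × Nat) Int)
    (hij : j ≤ i + l) (hC : Correct cs m) :
    ∃ m', solve cs l i j m = (fval cs i j, m') ∧ Correct cs m' := by
  obtain ⟨m', used, hu, hC', hget', _, heq'⟩ := run_top cs l i j m hij hC
  have hbig : (3:Nat) ≤ 2 ^ (l + 3) := by
    have : (2:Nat) ^ 3 ≤ 2 ^ (l + 3) := Nat.pow_le_pow_right (by norm_num) (by omega)
    omega
  have hloop : solveLoop cs (2 ^ (l + 3)) [(i, j)] m = m' := by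
    have hsplit : 2 ^ (l + 3) = used + (2 ^ (l + 3) - used) := by omega
    rw [hsplit, heq', solveLoop_nil]
  refine ⟨m', ?_, hC'⟩
  show (let m'' := solveLoop cs (2 ^ (l + 3)) [(i, j)] m; (m''.getD (i, j) 0, m'')) = _
  simp only [hloop]
  rw [PySem.Dict.getD_of_get?_eq_some _ _ hget']

-- ===== inner loop of B: fills row i from column j0 rightwards =====
lemma innerB (cs : List Char) (l i : Nat) (hi : i < l) :
    ∀ n j0, i < j0 → j0 + n ≤ l →
      ∀ t m, Fill cs l (fun i' j' => decide (i' < i ∨ (i' = i ∧ j' < j0) ∨ j' ≤ i')) t →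
        Correct cs m →
        Fill cs l (fun i' j' => decide (i' < i ∨ (i' = i ∧ j' < j0 + n) ∨ j' ≤ i'))
          ((List.range' j0 n).foldl (fun st j =>
            let r := solve cs l i j st.2
            (tset st.1 i j r.1, r.2)) (t, m)).1 ∧
        Correct cs ((List.range' j0 n).foldl (fun st j =>
            let r := solve cs l i j st.2
            (tset st.1 i j r.1, r.2)) (t, m)).2 := by
  intro n
  induction n with
  | zero =>
    intro j0 _ _ t m hF hC
    simp only [List.range'_zero, List.foldl_nil]
    exact ⟨hF, hC⟩
  | succ n ih =>
    intro j0 hij0 hle t m hF hC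
    rw [List.range'_succ, List.foldl_cons]
    have hj0l : j0 < l := by omega
    obtain ⟨m', hs, hC'⟩ := solve_correct cs l i j0 m (by omega) hC
    have hred : (let r := solve cs l i j0 (t, m).2; (tset (t, m).1 i j0 r.1, r.2))
        = (tset t i j0 (fval cs i j0), m') := by
      show (let r := solve cs l i j0 m; (tset t i j0 r.1, r.2)) = _
      rw [hs]
    rw [hred]
    have hF' : Fill cs l (fun i' j' => decide (i' < i ∨ (i' = i ∧ j' < j0 + 1) ∨ j' ≤ i'))
        (tset t i j0 (fval cs i j0)) := by
      refine Fill_congr (Fill_write hF hi hj0l rfl) ?_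
      intro i' j' _ _
      apply if_iff_val
      simp only [Bool.or_eq_true, Bool.and_eq_true, decide_eq_true_eq]
      omega
    have := ih (j0 + 1) (by omega) (by omega) _ _ hF' hC'
    refine ⟨Fill_congr this.1 ?_, this.2⟩
    intro i' j' _ _
    apply if_iff_val
    simp only [decide_eq_true_eq]
    omega

-- ===== outer loop of B: rows i0, i0+1, … =====
lemma outerB (cs : List Char) (l : Nat) :
    ∀ n i0, i0 + n ≤ l →
      ∀ t m, Fill cs l (fun i' j' => decide (i' < i0 ∨ j' ≤ i')) t → Correct cs m →
        Fill cs l (fun i' j' => decide (i' < i0 + n ∨ j' ≤ i'))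
          ((List.range' i0 n).foldl (rowB cs l) (t, m)).1 ∧
        Correct cs ((List.range' i0 n).foldl (rowB cs l) (t, m)).2 := by
  intro n
  induction n with
  | zero =>
    intro i0 _ t m hF hC
    simp only [List.range'_zero, List.foldl_nil]
    exact ⟨hF, hC⟩
  | succ n ih =>
    intro i0 hle t m hF hC
    rw [List.range'_succ, List.foldl_cons]
    have hi0l : i0 < l := by omega
    have hstart : Fill cs l
        (fun i' j' => decide (i' < i0 ∨ (i' = i0 ∧ j' < i0 + 1) ∨ j' ≤ i')) t := by
      refine Fill_congr hF ?_
      intro i' j' _ _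
      apply if_iff_val
      simp only [decide_eq_true_eq]
      omega
    have hrow := innerB cs l i0 hi0l (l - (i0 + 1)) (i0 + 1) (by omega) (by omega) t m hstart hC
    have hrow1 : Fill cs l (fun i' j' => decide (i' < i0 + 1 ∨ j' ≤ i'))
        (rowB cs l (t, m) i0).1 := by
      refine Fill_congr hrow.1 ?_
      intro i' j' _ hj'
      apply if_iff_val
      simp only [decide_eq_true_eq]
      omega
    have hrow2 : Correct cs (rowB cs l (t, m) i0).2 := hrow.2
    have := ih (i0 + 1) (by omega) _ _ hrow1 hrow2
    refine ⟨Fill_congr this.1 ?_, this.2⟩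
    intro i' j' _ _
    apply if_iff_val
    simp only [decide_eq_true_eq]
    omega

-- two fully-filled tables are equal
lemma Fill_eq {cs : List Char} {l : Nat} {P Q : Nat → Nat → Bool} {t t' : List (List Int)}
    (h : Fill cs l P t) (h' : Fill cs l Q t')
    (hP : ∀ i j, i < l → j < l → P i j = true) (hQ : ∀ i j, i < l → j < l → Q i j = true) :
    t = t' := by
  obtain ⟨ht, hr, hc⟩ := h
  obtain ⟨ht', hr', hc'⟩ := h'
  apply List.ext_getElem (by omega)
  intro i hi hi'
  have hil : i < l := by omega
  have hrl : t[i].length = l := hr _ (List.getElem_mem hi)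
  have hrl' : t'[i].length = l := hr' _ (List.getElem_mem hi')
  apply List.ext_getElem (by omega)
  intro j hj hj'
  have hjl : j < l := by omega
  have g1 : tget t i j = t[i][j] := by
    simp [tget, List.getD, hi, hj]
  have g2 : tget t' i j = t'[i][j] := by
    simp [tget, List.getD, hi', hj']
  rw [← g1, ← g2, hc i j hil hjl, hc' i j hil hjl,
      if_pos (hP i j hil hjl), if_pos (hQ i j hil hjl)]

-- ===== VERDICT (by name: the statement is the Claim_ definition above) =====
theorem longestnonpalindromicsubsequence_spec : Claim_equal_longestnonpalindromicsubsequence := by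
  intro s _ hpre
  unfold Spec_longestnonpalindromicsubsequence
  unfold longestnonpalindromicsubsequence longestnonpalindromicsubsequence_alt
  have hl2 : 2 ≤ s.toList.length := hpre
  simp only [if_neg (by omega : ¬ s.toList.length ≤ 1)]
  have hA := outerA s.toList s.toList.length rfl (s.toList.length - 1) 2 _ (by omega) (by omega)
    (Fill_init s.toList s.toList.length)
  have hBinit : Fill s.toList s.toList.length (fun i' j' => decide (i' < 0 ∨ j' ≤ i'))
      ((List.range s.toList.length).map (fun _ => (List.range s.toList.length).map (fun _ => (0 : Int)))) := by
    refine Fill_congr (Fill_init s.toList s.toList.length) ?_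
    intro i j _ _
    by_cases hp : j ≤ i
    · rw [if_pos (by simp only [decide_eq_true_eq]; omega),
          if_pos (by simp only [decide_eq_true_eq]; omega)]
    · rw [if_neg (by simp only [decide_eq_true_eq]; omega),
          if_neg (by simp only [decide_eq_true_eq]; omega)]
  have hCempty : Correct s.toList PySem.Dict.empty := by
    intro a b v h
    rw [PySem.Dict.get?_empty] at h
    cases h
  have hB := outerB s.toList s.toList.length s.toList.length 0 (by omega) _ _ hBinit hCempty
  rw [← List.range_eq_range', Nat.zero_add] at hB
  exact Fill_eq hA hB.1
    (fun i j hi hj => by simp only [decide_eq_true_eq]; omega)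
    (fun i j hi hj => by simp only [decide_eq_true_eq]; omega)
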